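-- pv_equiv track=rewrite | github.com/choo0618/TIL | algoritm/19하반기 코딩테스트/딜리버리히어로코리아/5.py | solution
-- ===== SOURCE A (Python) =====
-- def solution(S):
--     res = 0
--     a_cnt = 0
--     for i, s in enumerate(S):
--         if s == 'a':
--             a_cnt += 1
--         else:
--             res += 2 - a_cnt
--             a_cnt = 0
--         if a_cnt >= 3:
--             return -1
--     if a_cnt < 2:
--         res += 2 - a_cnt
--     return res
-- ===== SOURCE B (Python) =====
-- def solution(S):
--     # Closed form: no scan state. -1 iff some 'a'-run has length >= 3 ('aaa' in S).
--     # Otherwise every non-'a' char contributes 2, each completed (non-trailing)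
--     # 'a'-run is subtracted once, and the trailing run adds 2 - t when t < 2.
--     if 'aaa' in S:
--         return -1
--     a_total = S.count('a')
--     t = len(S) - len(S.rstrip('a'))
--     res = 2 * (len(S) - a_total) - (a_total - t)
--     if t < 2:
--         res += 2 - t
--     return res
-- ===== Notes on version B (the rewrite author's own statement) =====
-- stated objective: simpler
-- what changed: Replaces A's character-by-character scan with mutable (res, a_cnt) state and early return by a loop-free closed form: -1 iff 'aaa' in S, otherwise an arithmetic expression in len(S), S.count('a') and the trailing 'a'-run length obtained via rstrip('a').
import Mathlib
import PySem

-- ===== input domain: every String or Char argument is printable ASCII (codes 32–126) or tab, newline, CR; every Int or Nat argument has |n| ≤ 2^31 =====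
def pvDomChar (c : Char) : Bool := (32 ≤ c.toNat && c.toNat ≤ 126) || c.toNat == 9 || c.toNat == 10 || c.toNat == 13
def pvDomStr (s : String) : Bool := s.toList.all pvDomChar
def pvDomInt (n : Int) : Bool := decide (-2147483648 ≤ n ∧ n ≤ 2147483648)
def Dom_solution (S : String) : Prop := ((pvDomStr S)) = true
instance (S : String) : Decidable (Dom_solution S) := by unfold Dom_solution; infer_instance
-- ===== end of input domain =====

-- B replaces A's stateful character scan by a loop-free closed form built from
-- 'aaa' in S, S.count('a') and the trailing 'a'-run length (objective: simpler).

-- ===== PORT A =====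
-- the for-loop over the characters, state (res, a_cnt); the early 'return -1' kept as a branch
def solutionGo : List Char → Int → Int → Int
  | [], res, a_cnt => if a_cnt < 2 then res + (2 - a_cnt) else res
  | s :: rest, res, a_cnt =>
      let p := if s == 'a' then (res, a_cnt + 1) else (res + (2 - a_cnt), (0 : Int))
      if p.2 ≥ 3 then -1 else solutionGo rest p.1 p.2

def solution (S : String) : Int := solutionGo S.toList 0 0

-- ===== PORT B =====
-- hand port of S.rstrip('a') (PySem has no rstrip-with-chars argument); exact: drops exactly the trailing 'a's
def rstripA (l : List Char) : List Char := (l.reverse.dropWhile (· == 'a')).reverse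

def solution_alt (S : String) : Int :=
  if PySem.Str.isIn "aaa" S then -1
  else
    let aTotal : Int := (PySem.Str.count S "a" : Int)
    let t : Int := PySem.Str.len S - ((rstripA S.toList).length : Int)
    let res : Int := 2 * (PySem.Str.len S - aTotal) - (aTotal - t)
    if t < 2 then res + (2 - t) else res

-- ===== PRECONDITION & SPEC =====
def Spec_solution (S : String) (out : Int) : Prop := out = solution_alt S
instance (S : String) (out : Int) : Decidable (Spec_solution S out) := by unfold Spec_solution; infer_instance

-- ===== CLAIM (what is proved, stated in full; the proofs are below) =====
def Claim_equal_solution : Prop := ∀ (S : String), Dom_solution S → Spec_solution S (solution S)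

-- ===== LEMMAS AND PROOFS =====

-- abbreviations used only by the proofs
def trailA (l : List Char) : Nat := (l.reverse.takeWhile (· == 'a')).length
def allA (l : List Char) : Bool := l.all (· == 'a')
-- the 'a'-run length A's scan holds at the end of the input, starting with carry k
def tState (l : List Char) (k : Nat) : Int := if allA l then (k : Int) + l.length else (trailA l : Int)
-- does A's scan with carry k hit an 'a'-run of length 3?
def badB : List Char → Nat → Bool
  | [], _ => false
  | c :: t, k => if c = 'a' then (if k + 1 ≥ 3 then true else badB t (k + 1)) else badB t 0
def tailTerm (t : Int) : Int := if t < 2 then 2 - t else 0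
def closedF (l : List Char) (res : Int) (k : Nat) : Int :=
  res + 2 * ((l.length : Int) - l.count 'a') - (((k : Int) + l.count 'a') - tState l k)
    + tailTerm (tState l k)

theorem takeWhile_rev_ne (t : List Char) (h : allA t = false) :
    (t.reverse.takeWhile (· == 'a')).length ≠ t.reverse.length := by
  intro hlen
  have heq : t.reverse.takeWhile (· == 'a') = t.reverse :=
    (List.takeWhile_sublist _).eq_of_length (by simpa using hlen)
  have hall := List.takeWhile_eq_self_iff.mp heq
  simp only [allA, List.all_eq_false] at h
  obtain ⟨x, hx, hxa⟩ := h
  exact hxa (hall x (by simpa using hx))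

theorem trailA_cons_not_allA (c : Char) (t : List Char) (h : allA t = false) :
    trailA (c :: t) = trailA t := by
  simp only [trailA, List.reverse_cons, List.takeWhile_append,
    if_neg (takeWhile_rev_ne t h)]

theorem trailA_allA (t : List Char) (h : allA t = true) : trailA t = t.length := by
  simp only [allA, List.all_eq_true] at h
  have : t.reverse.takeWhile (· == 'a') = t.reverse := by
    apply List.takeWhile_eq_self_iff.mpr
    intro x hx; exact h x (by simpa using hx)
  simp [trailA, this]

theorem trailA_cons_allA (c : Char) (t : List Char) (hc : ¬ c = 'a') (h : allA t = true) :
    trailA (c :: t) = t.length := by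
  have ht : t.reverse.takeWhile (· == 'a') = t.reverse := by
    apply List.takeWhile_eq_self_iff.mpr
    simp only [allA, List.all_eq_true] at h
    intro x hx; exact h x (by simpa using hx)
  simp [trailA, List.takeWhile_append, ht, hc]

theorem tState_zero (l : List Char) : tState l 0 = (trailA l : Int) := by
  unfold tState
  by_cases h : allA l = true
  · simp [h, trailA_allA l h]
  · simp [eq_false_of_ne_true h]

-- the loop invariant of A's scan
theorem go_eq (l : List Char) : ∀ (res : Int) (k : Nat), k ≤ 2 →
    solutionGo l res (k : Int) = if badB l k then -1 else closedF l res k := by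
  induction l with
  | nil =>
      intro res k hk
      simp only [solutionGo, badB, Bool.false_eq_true, if_false, closedF, tState, allA,
        List.all_nil, List.length_nil, List.count_nil, tailTerm]
      push_cast; split_ifs <;> omega
  | cons c t ih =>
      intro res k hk
      by_cases hc : c = 'a'
      · subst hc
        by_cases hk2 : k = 2
        · subst hk2
          norm_num [solutionGo, badB]
        · have hk1 : k ≤ 1 := by omega
          have hlt : ¬ ((k : Int) + 1 ≥ 3) := by push_cast; omega
          have hbad : badB ('a' :: t) k = badB t (k + 1) := by
            have : ¬ (k + 1 ≥ 3) := by omega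
            simp [badB, this]
          have hF : closedF ('a' :: t) res k = closedF t res (k + 1) := by
            have hT : tState ('a' :: t) k = tState t (k + 1) := by
              unfold tState
              by_cases ht : allA t = true
              · have h1 : allA ('a' :: t) = true := by simp [allA] at ht ⊢; exact ht
                simp only [h1, ht, if_pos rfl, List.length_cons]
                push_cast; ring
              · have h1 : allA ('a' :: t) = false := by
                  simp only [allA, List.all_cons] at *
                  simp [eq_false_of_ne_true ht]
                simp [h1, eq_false_of_ne_true ht,
                  trailA_cons_not_allA _ _ (eq_false_of_ne_true ht)]
            unfold closedF
            rw [hT]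
            simp only [List.length_cons, List.count_cons_self]
            push_cast; ring
          have hstep : solutionGo ('a' :: t) res (k : Int) = solutionGo t res ((k : Int) + 1) := by
            simp [solutionGo, hlt]
          rw [hstep, show ((k : Int) + 1) = (((k + 1 : Nat)) : Int) by push_cast; ring,
            ih res (k + 1) (by omega), hbad, hF]
      · have hbe : (c == 'a') = false := by simp [hc]
        have hbad : badB (c :: t) k = badB t 0 := by simp [badB, hc]
        have hT : tState (c :: t) k = tState t 0 := by
          unfold tState
          have h1 : allA (c :: t) = false := by simp [allA, hc]
          by_cases ht : allA t = true
          · simp [h1, ht, trailA_cons_allA c t hc ht]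
          · simp [h1, eq_false_of_ne_true ht,
              trailA_cons_not_allA c t (eq_false_of_ne_true ht)]
        have hF : closedF (c :: t) res k = closedF t (res + (2 - (k : Int))) 0 := by
          unfold closedF
          rw [hT]
          simp only [List.length_cons, List.count_cons_of_ne (by exact hc)]
          push_cast; ring
        have hstep : solutionGo (c :: t) res (k : Int)
            = solutionGo t (res + (2 - (k : Int))) 0 := by
          norm_num [solutionGo, hbe]
        rw [hstep, hbad, hF, show (0 : Int) = (((0 : Nat)) : Int) by norm_num,
          ih (res + (2 - (k : Int))) 0 (by omega)]

theorem aaa_not_infix_replicate (k : Nat) (hk : k ≤ 2) :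
    ¬ (['a', 'a', 'a'] <:+: List.replicate k 'a') := by
  intro h
  have := h.length_le
  simp only [List.length_replicate, List.length_cons, List.length_nil] at this
  omega

theorem aaa_not_prefix (m : Nat) (hm : m ≤ 2) (c : Char) (hc : ¬ c = 'a') (t : List Char)
    (hp : ['a', 'a', 'a'] <+: (List.replicate m 'a' ++ c :: t)) : False := by
  interval_cases m <;> simp_all [List.cons_prefix_cons, List.replicate] <;>
    first
      | exact hc hp.1.symm
      | exact hc hp.symm

theorem infix_skip_head (c : Char) (hc : ¬ c = 'a') (t : List Char) (k : Nat) (hk : k ≤ 2) :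
    (['a', 'a', 'a'] <:+: (List.replicate k 'a' ++ c :: t)) ↔ ['a', 'a', 'a'] <:+: t := by
  constructor
  · intro h
    have h1 : PySem.Chars.isIn ['a','a','a'] (List.replicate k 'a' ++ c :: t) = true :=
      (PySem.Chars.isIn_iff_infix _ _).mpr h
    obtain ⟨j, hj⟩ := (PySem.Chars.exists_prefix_drop_iff_isIn _ _).mpr h1
    by_cases hjk : j ≤ k
    · exfalso
      rw [List.drop_append_of_le_length (by simpa using hjk), List.drop_replicate] at hj
      exact aaa_not_prefix (k - j) (by omega) c hc t hj
    · have hdrop : (List.replicate k 'a' ++ c :: t).drop j = t.drop (j - k - 1) := by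
        have h1 : (List.replicate k 'a' (α := Char)).drop j = [] := by
          rw [List.drop_replicate]
          have : k - j = 0 := by omega
          simp [this]
        have h2 : j - (List.replicate k 'a' (α := Char)).length = (j - k - 1) + 1 := by
          simp; omega
        rw [List.drop_append, h1, h2, List.drop_succ_cons, List.nil_append]
      rw [hdrop] at hj
      exact (PySem.Chars.isIn_iff_infix _ _).mp
        ((PySem.Chars.exists_prefix_drop_iff_isIn _ _).mp ⟨j - k - 1, hj⟩)
  · intro h
    exact h.trans (List.IsSuffix.isInfix ⟨List.replicate k 'a' ++ [c], by simp⟩)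

theorem badB_iff (l : List Char) : ∀ (k : Nat), k ≤ 2 →
    (badB l k = true ↔ ['a', 'a', 'a'] <:+: (List.replicate k 'a' ++ l)) := by
  induction l with
  | nil =>
      intro k hk
      simp only [badB, List.append_nil]
      exact ⟨fun h => by simp at h, fun h => absurd h (aaa_not_infix_replicate k hk)⟩
  | cons c t ih =>
      intro k hk
      by_cases hc : c = 'a'
      · subst hc
        have hrep : List.replicate k 'a' ++ 'a' :: t = List.replicate (k + 1) 'a' ++ t := by
          rw [List.replicate_succ']; simp
        by_cases hk2 : k = 2
        · subst hk2
          constructor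
          · intro _
            rw [hrep]
            exact List.IsPrefix.isInfix ⟨t, rfl⟩
          · intro _; simp [badB]
        · have hb : badB ('a' :: t) k = badB t (k + 1) := by
            have : ¬ (k + 1 ≥ 3) := by omega
            simp [badB, this]
          rw [hb, hrep]
          exact ih (k + 1) (by omega)
      · have hb : badB (c :: t) k = badB t 0 := by simp [badB, hc]
        rw [hb, infix_skip_head c hc t k hk]
        simpa using ih 0 (by omega)

theorem count_go_single (c : Char) : ∀ (fuel : Nat) (l : List Char) (acc : Nat),
    l.length ≤ fuel → PySem.Chars.count.go [c] fuel l acc = acc + l.count c := by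
  intro fuel
  induction fuel with
  | zero =>
      intro l acc h
      have hl : l = [] := List.length_eq_zero_iff.mp (by omega)
      subst hl; simp [PySem.Chars.count.go]
  | succ n ih =>
      intro l acc h
      cases l with
      | nil => simp [PySem.Chars.count.go]
      | cons x t =>
          have hlen : t.length ≤ n := by simpa using h
          by_cases hx : x = c
          · subst hx
            have hp : [x].isPrefixOf (x :: t) = true := by simp [List.isPrefixOf]
            simp only [PySem.Chars.count.go, hp, if_pos rfl, List.length_cons,
              List.length_nil, List.drop_succ_cons, List.drop_zero, if_true]
            rw [ih t (acc + 1) hlen]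
            simp [List.count_cons]
            omega
          · have hp : [c].isPrefixOf (x :: t) = false := by
              simp [List.isPrefixOf, hx]
              intro hcx; exact hx hcx.symm
            simp only [PySem.Chars.count.go, hp, Bool.false_eq_true, if_false]
            rw [ih t acc hlen]
            simp [List.count_cons, hx]

theorem count_single (l : List Char) (c : Char) :
    PySem.Chars.count l [c] = l.count c := by
  simp only [PySem.Chars.count, List.isEmpty_cons, Bool.false_eq_true, if_false]
  simpa using count_go_single c l.length l 0 le_rfl

theorem trailA_le (l : List Char) : trailA l ≤ l.length := by
  have := (List.takeWhile_sublist (l := l.reverse) (· == 'a')).length_le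
  simpa [trailA] using this

theorem rstripA_length (l : List Char) : (rstripA l).length = l.length - trailA l := by
  have h := List.takeWhile_append_dropWhile (p := (· == 'a')) (l := l.reverse)
  have hlen := congrArg List.length h
  simp only [List.length_append, List.length_reverse] at hlen
  simp only [rstripA, List.length_reverse]
  simp only [trailA]
  omega

-- ===== VERDICT (by name: the statement is the Claim_ definition above) =====
theorem solution_spec : Claim_equal_solution := by
  intro S _
  unfold Spec_solution solution solution_alt
  have hgo := go_eq S.toList 0 0 (by omega)
  simp only [Nat.cast_zero] at hgo
  have hbad := badB_iff S.toList 0 (by omega)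
  simp only [List.replicate_zero, List.nil_append] at hbad
  have haaa : ("aaa" : String).toList = ['a', 'a', 'a'] := by decide
  by_cases hin : PySem.Str.isIn "aaa" S = true
  · have h1 : ['a','a','a'] <:+: S.toList := by
      have := (PySem.Str.isIn_iff_infix _ _).mp hin
      rwa [haaa] at this
    have h2 : badB S.toList 0 = true := hbad.mpr h1
    rw [hgo, if_pos h2, if_pos hin]
  · have hnot : ¬ (['a','a','a'] <:+: S.toList) := by
      intro h
      exact hin ((PySem.Str.isIn_iff_infix _ _).mpr (by rwa [haaa]))
    have hb : badB S.toList 0 = false := by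
      rw [Bool.eq_false_iff]; intro h
      exact hnot (hbad.mp h)
    rw [hgo, if_neg (by simp [hb]), if_neg hin]
    unfold closedF
    rw [tState_zero]
    have hcount : (PySem.Str.count S "a" : Int) = (S.toList.count 'a' : Int) := by
      rw [PySem.Str.count_eq, show ("a" : String).toList = ['a'] from by decide, count_single]
    have hlen : PySem.Str.len S = (S.toList.length : Int) := PySem.Str.len_eq S
    have hrs : ((rstripA S.toList).length : Int)
        = (S.toList.length : Int) - (trailA S.toList : Int) := by
      rw [rstripA_length]
      push_cast [Nat.cast_sub (trailA_le S.toList)]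
      ring
    rw [hcount, hlen, hrs]
    have hT2 : (S.toList.length : Int) - ((S.toList.length : Int) - (trailA S.toList : Int))
        = (trailA S.toList : Int) := by ring
    rw [hT2]
    unfold tailTerm
    by_cases h1 : (trailA S.toList : Int) < 2
    · rw [if_pos h1, if_pos h1]; push_cast; ring
    · rw [if_neg h1, if_neg h1]; push_cast; ring
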